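-- pv_equiv track=rewrite | github.com/kwasniewski27/prg-basics | próbnytest/p10.py | f
-- ===== SOURCE A (Python) =====
-- def f(array):
--     min_value = array[0][0]
--     min_col = -1
--     min_row = -1
--     for i in range(len(array)):
--         for j in range(len(array[i])):
--             if array[i][j]<min_value:
--                 min_value = array[i][j]
--                 min_col = i
--                 min_row = j
--     if min_col == min_row:
--         return True
--     return False
-- ===== SOURCE B (Python) =====
-- def f(array):
--     # pass 1: global minimum (seeded from array[0][0], like A, so empty input raises the same IndexError)
--     m = array[0][0]
--     for row in array:
--         for x in row:
--             if x < m: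
--                 m = x
--     # pass 2: first occurrence of the minimum in row-major order; on the diagonal?
--     for i, row in enumerate(array):
--         for j, x in enumerate(row):
--             if x == m:
--                 return i == j
-- ===== Notes on version B (the rewrite author's own statement) =====
-- stated objective: alternative
-- what changed: Replaces A's single index-tracking scan with sentinel coordinates by two plain scans: one computing the global minimum value, one returning whether the first row-major occurrence of that minimum is on the diagonal.
-- outside the precondition, e.g. on f([]): A raises IndexError, B raises IndexError; on f([[]]): A raises IndexError, B raises IndexError
import Mathlib
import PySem

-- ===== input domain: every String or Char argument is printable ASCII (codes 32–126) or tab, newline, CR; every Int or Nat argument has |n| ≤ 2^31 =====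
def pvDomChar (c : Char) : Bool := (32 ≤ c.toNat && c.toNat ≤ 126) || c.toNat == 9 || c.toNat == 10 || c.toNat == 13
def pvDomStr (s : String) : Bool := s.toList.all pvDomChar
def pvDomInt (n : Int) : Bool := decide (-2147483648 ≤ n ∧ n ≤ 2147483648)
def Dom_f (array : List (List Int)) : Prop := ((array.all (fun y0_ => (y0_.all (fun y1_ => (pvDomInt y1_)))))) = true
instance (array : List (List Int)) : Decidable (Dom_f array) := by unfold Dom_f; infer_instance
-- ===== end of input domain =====

-- B replaces A's single index-tracking scan (with -1/-1 sentinel coordinates) by two plain scans: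
-- compute the global minimum value, then test whether its first row-major occurrence is on the diagonal.

-- ===== PORT A =====
def f (array : List (List Int)) : Bool :=
  let min_value := PySem.List.pyGetD (PySem.List.pyGetD array 0 []) 0 0
  let st :=
    (PySem.List.pyRange 0 (array.length : Int) 1).foldl
      (fun st i =>
        let row := PySem.List.pyGetD array i []
        (PySem.List.pyRange 0 (row.length : Int) 1).foldl
          (fun st j =>
            let x := PySem.List.pyGetD row j 0
            if x < st.1 then (x, i, j) else st)
          st)
      (min_value, (-1 : Int), (-1 : Int))
  if st.2.1 == st.2.2 then true else false

-- ===== PORT B =====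
-- pass 2 of Source B: first row-major element equal to m; none = Python's implicit None (unreachable under Pre_)
def fAltInner (m i : Int) : List (Int × Int) → Option Bool
  | [] => none
  | (j, x) :: rest => if x == m then some (i == j) else fAltInner m i rest

def fAltOuter (m : Int) : List (Int × List Int) → Option Bool
  | [] => none
  | (i, row) :: rest =>
    match fAltInner m i (PySem.List.enumerate row 0) with
    | some b => some b
    | none => fAltOuter m rest

def f_alt (array : List (List Int)) : Bool :=
  let m :=
    array.foldl (fun m row => row.foldl (fun m x => if x < m then x else m) m)
      (PySem.List.pyGetD (PySem.List.pyGetD array 0 []) 0 0)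
  (fAltOuter m (PySem.List.enumerate array 0)).getD false

-- ===== PRECONDITION & SPEC =====
-- Pre_ excludes exactly the inputs where both Pythons raise IndexError on array[0][0]: empty array or empty first row.
def Pre_f (array : List (List Int)) : Prop := array ≠ [] ∧ array.headI ≠ []
instance (array : List (List Int)) : Decidable (Pre_f array) := by unfold Pre_f; infer_instance

def pvWitness_f : List (List Int) := [[3, 1], [0, 5]]

def Spec_f (array : List (List Int)) (out : Bool) : Prop := out = f_alt array
instance (array : List (List Int)) (out : Bool) : Decidable (Spec_f array out) := by unfold Spec_f; infer_instance

-- ===== CLAIM (what is proved, stated in full; the proofs are below) =====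
def Claim_equal_f : Prop := ∀ (array : List (List Int)), Dom_f array → Pre_f array → Spec_f array (f array)

-- ===== LEMMAS AND PROOFS =====

-- the array flattened to (row index, column index, value) triples, in row-major order
def pvFlat (array : List (List Int)) : List (Int × Int × Int) :=
  (PySem.List.enumerate array 0).flatMap
    (fun p => (PySem.List.enumerate p.2 0).map (fun q => (p.1, q.1, q.2)))

def pvMin : Int → List (Int × Int × Int) → Int
  | s, [] => s
  | s, t :: l => pvMin (if t.2.2 < s then t.2.2 else s) l

def pvA : Int × Int × Int → List (Int × Int × Int) → Int × Int × Int
  | st, [] => st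
  | st, t :: l => pvA (if t.2.2 < st.1 then (t.2.2, t.1, t.2.1) else st) l

def pvFind (m : Int) : List (Int × Int × Int) → Option Bool
  | [] => none
  | t :: rest => if t.2.2 == m then some (t.1 == t.2.1) else pvFind m rest

theorem pvMin_le (l : List (Int × Int × Int)) : ∀ s : Int, pvMin s l ≤ s := by
  induction l with
  | nil => intro s; simp [pvMin]
  | cons t l ih =>
    intro s
    have h := ih (if t.2.2 < s then t.2.2 else s)
    simp only [pvMin]
    split_ifs at h ⊢ <;> omega

theorem pvA_spec (l : List (Int × Int × Int)) : ∀ s c r : Int,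
    (pvA (s, c, r) l).1 = pvMin s l ∧
    (if pvMin s l < s then
        pvFind (pvMin s l) l = some ((pvA (s, c, r) l).2.1 == (pvA (s, c, r) l).2.2)
      else (pvA (s, c, r) l).2 = (c, r)) := by
  induction l with
  | nil => intro s c r; simp [pvA, pvMin]
  | cons t l ih =>
    intro s c r
    by_cases h : t.2.2 < s
    · simp only [pvA, pvMin, pvFind, if_pos h]
      obtain ⟨h1, h2⟩ := ih t.2.2 t.1 t.2.1
      have hle := pvMin_le l t.2.2
      refine ⟨h1, ?_⟩
      rw [if_pos (by omega)]
      by_cases hm : pvMin t.2.2 l < t.2.2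
      · rw [if_neg (by simp; omega)]
        rw [if_pos hm] at h2
        exact h2
      · have heq : pvMin t.2.2 l = t.2.2 := by omega
        rw [if_neg hm] at h2
        rw [heq, if_pos (by simp)]
        rw [show (pvA (t.2.2, t.1, t.2.1) l).2.1 = t.1 by rw [h2],
            show (pvA (t.2.2, t.1, t.2.1) l).2.2 = t.2.1 by rw [h2]]
    · simp only [pvA, pvMin, pvFind, if_neg h]
      obtain ⟨h1, h2⟩ := ih s c r
      have hle := pvMin_le l s
      refine ⟨h1, ?_⟩
      by_cases hm : pvMin s l < s
      · rw [if_pos hm, if_neg (by simp; omega)]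
        rw [if_pos hm] at h2
        exact h2
      · rw [if_neg hm]
        rw [if_neg hm] at h2
        exact h2

-- bridge: a 'for i in range(len(xs)): … xs[i] …' fold equals a fold over enumerate xs
theorem foldl_pyRange_enumerate {σ α : Type} (xs : List α) (d : α) (F : σ → Int → α → σ) (init : σ) :
    (PySem.List.pyRange 0 (xs.length : Int) 1).foldl (fun st i => F st i (PySem.List.pyGetD xs i d)) init
      = (PySem.List.enumerate xs 0).foldl (fun st p => F st p.1 p.2) init := by
  rw [PySem.List.enumerate_eq_map_pyRange (d := d), List.foldl_map]
  rfl

-- bridge: nested fold over rows equals a single fold over the flattened triple list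
theorem foldl_flat {σ : Type} (F : σ → Int × Int × Int → σ) :
    ∀ (L : List (Int × List Int)) (init : σ),
      L.foldl (fun st p => (PySem.List.enumerate p.2 0).foldl (fun st q => F st (p.1, q.1, q.2)) st) init
        = (L.flatMap (fun p => (PySem.List.enumerate p.2 0).map (fun q => (p.1, q.1, q.2)))).foldl F init := by
  intro L
  induction L with
  | nil => intro init; simp
  | cons p L ih =>
    intro init
    simp only [List.foldl_cons, List.flatMap_cons, List.foldl_append, List.foldl_map]
    exact ih _

theorem pvA_eq_foldl (l : List (Int × Int × Int)) : ∀ st,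
    l.foldl (fun st t => if t.2.2 < st.1 then (t.2.2, t.1, t.2.1) else st) st = pvA st l := by
  induction l with
  | nil => intro st; simp [pvA]
  | cons t l ih => intro st; simp only [List.foldl_cons, pvA]; exact ih _

theorem inner_bridge (i : Int) (row : List Int) (st : Int × Int × Int) :
    (PySem.List.pyRange 0 (row.length : Int) 1).foldl
        (fun st j => if PySem.List.pyGetD row j 0 < st.1 then (PySem.List.pyGetD row j 0, i, j) else st) st
      = (PySem.List.enumerate row 0).foldl (fun st q => if q.2 < st.1 then (q.2, i, q.1) else st) st :=
  foldl_pyRange_enumerate row 0 (fun st j x => if x < st.1 then (x, i, j) else st) st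

theorem nested_bridge (array : List (List Int)) (st0 : Int × Int × Int) :
    (PySem.List.pyRange 0 (array.length : Int) 1).foldl
        (fun st i =>
          (PySem.List.pyRange 0 ((PySem.List.pyGetD array i []).length : Int) 1).foldl
            (fun st j =>
              if PySem.List.pyGetD (PySem.List.pyGetD array i []) j 0 < st.1 then
                (PySem.List.pyGetD (PySem.List.pyGetD array i []) j 0, i, j)
              else st) st) st0
      = pvA st0 (pvFlat array) := by
  rw [foldl_pyRange_enumerate array []
    (F := fun st i row =>
      (PySem.List.pyRange 0 (row.length : Int) 1).foldl
        (fun st j => if PySem.List.pyGetD row j 0 < st.1 then (PySem.List.pyGetD row j 0, i, j) else st) st)]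
  simp only [inner_bridge]
  rw [foldl_flat (F := fun st t => if t.2.2 < st.1 then (t.2.2, t.1, t.2.1) else st)]
  rw [pvA_eq_foldl]
  rfl

theorem f_eq_pvA (array : List (List Int)) :
    f array =
      ((pvA (PySem.List.pyGetD (PySem.List.pyGetD array 0 []) 0 0, -1, -1) (pvFlat array)).2.1
        == (pvA (PySem.List.pyGetD (PySem.List.pyGetD array 0 []) 0 0, -1, -1) (pvFlat array)).2.2) := by
  simp only [f, nested_bridge]
  split <;> simp_all

theorem pvMin_eq_inner (row : List Int) : ∀ (s0 m : Int),
    (PySem.List.enumerate row s0).foldl (fun a q => if q.2 < a then q.2 else a) m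
      = row.foldl (fun a x => if x < a then x else a) m := by
  induction row with
  | nil => intro s0 m; simp [PySem.List.enumerate_nil]
  | cons x row ih => intro s0 m; simp only [PySem.List.enumerate_cons, List.foldl_cons]; exact ih _ _

theorem pvMin_eq_foldl (l : List (Int × Int × Int)) : ∀ s,
    l.foldl (fun a t => if t.2.2 < a then t.2.2 else a) s = pvMin s l := by
  induction l with
  | nil => intro s; simp [pvMin]
  | cons t l ih => intro s; simp only [List.foldl_cons, pvMin]; exact ih _

theorem falt_min (array : List (List Int)) : ∀ (s0 s : Int),
    array.foldl (fun m row => row.foldl (fun m x => if x < m then x else m) m) s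
      = pvMin s ((PySem.List.enumerate array s0).flatMap
          (fun p => (PySem.List.enumerate p.2 0).map (fun q => (p.1, q.1, q.2)))) := by
  induction array with
  | nil => intro s0 s; simp [pvMin]
  | cons row arr ih =>
    intro s0 s
    simp only [PySem.List.enumerate_cons, List.flatMap_cons, List.foldl_cons]
    rw [← pvMin_eq_foldl, List.foldl_append, List.foldl_map]
    rw [show ((PySem.List.enumerate row 0).foldl
        (fun a q => if (s0, q.1, q.2).2.2 < a then (s0, q.1, q.2).2.2 else a) s)
      = row.foldl (fun a x => if x < a then x else a) s from pvMin_eq_inner row 0 s]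
    rw [pvMin_eq_foldl]
    exact ih _ _

theorem pvFind_append (m : Int) (l1 l2 : List (Int × Int × Int)) :
    pvFind m (l1 ++ l2) = match pvFind m l1 with
      | some b => some b
      | none => pvFind m l2 := by
  induction l1 with
  | nil => simp [pvFind]
  | cons t l1 ih =>
    simp only [List.cons_append, pvFind]
    split_ifs with h
    · rfl
    · exact ih

theorem fAltInner_eq_pvFind (m i : Int) (l : List (Int × Int)) :
    fAltInner m i l = pvFind m (l.map (fun q => (i, q.1, q.2))) := by
  induction l with
  | nil => simp [fAltInner, pvFind]
  | cons q l ih =>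
    simp only [List.map_cons, fAltInner, pvFind]
    split_ifs with h
    · rfl
    · exact ih

theorem falt_find (m : Int) (array : List (List Int)) :
    ∀ s : Int, fAltOuter m (PySem.List.enumerate array s) =
      pvFind m ((PySem.List.enumerate array s).flatMap
        (fun p => (PySem.List.enumerate p.2 0).map (fun q => (p.1, q.1, q.2)))) := by
  induction array with
  | nil => intro s; simp [PySem.List.enumerate_nil, fAltOuter, pvFind]
  | cons row arr ih =>
    intro s
    simp only [PySem.List.enumerate_cons, List.flatMap_cons, fAltOuter]
    rw [pvFind_append, fAltInner_eq_pvFind, ih]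

-- ===== VERDICT (by name: the statement is the Claim_ definition above) =====
theorem f_spec : Claim_equal_f := by
  unfold Claim_equal_f
  intro array _ hpre
  unfold Spec_f
  obtain ⟨hne, hhd⟩ := hpre
  obtain ⟨r0, rs, rfl⟩ : ∃ r0 rs, array = r0 :: rs := by
    cases array with
    | nil => exact absurd rfl hne
    | cons r0 rs => exact ⟨r0, rs, rfl⟩
  obtain ⟨x, xs, rfl⟩ : ∃ x xs, r0 = x :: xs := by
    cases r0 with
    | nil => simp at hhd
    | cons x xs => exact ⟨x, xs, rfl⟩
  have hseed : PySem.List.pyGetD (PySem.List.pyGetD ((x :: xs) :: rs) 0 []) 0 0 = x := by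
    simp [PySem.List.pyGetD_zero_cons]
  have hflat : pvFlat ((x :: xs) :: rs) = (0, 0, x) ::
      ((PySem.List.enumerate xs 1).map (fun q => ((0 : Int), q.1, q.2)) ++
        (PySem.List.enumerate rs 1).flatMap
          (fun p => (PySem.List.enumerate p.2 0).map (fun q => (p.1, q.1, q.2)))) := by
    simp [pvFlat, PySem.List.enumerate_cons]
  rw [f_eq_pvA, hseed]
  simp only [f_alt, hseed]
  rw [falt_find, falt_min ((x :: xs) :: rs) 0]
  rw [show ((PySem.List.enumerate ((x :: xs) :: rs) 0).flatMap
        (fun p => (PySem.List.enumerate p.2 0).map (fun q => (p.1, q.1, q.2)))) = pvFlat ((x :: xs) :: rs)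
      from rfl]
  obtain ⟨h1, h2⟩ := pvA_spec (pvFlat ((x :: xs) :: rs)) x (-1) (-1)
  by_cases hm : pvMin x (pvFlat ((x :: xs) :: rs)) < x
  · rw [if_pos hm] at h2
    rw [h2]
    simp
  · rw [if_neg hm] at h2
    have hle : pvMin x (pvFlat ((x :: xs) :: rs)) ≤ x := by
      rw [hflat]; simp only [pvMin]; rw [if_neg (lt_irrefl x)]; exact pvMin_le _ x
    have heq : pvMin x (pvFlat ((x :: xs) :: rs)) = x := by omega
    rw [heq, hflat]
    simp only [pvFind]
    rw [if_pos (by simp)]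
    rw [← hflat]
    have e1 : (pvA (x, -1, -1) (pvFlat ((x :: xs) :: rs))).2.1 = -1 := by rw [h2]
    have e2 : (pvA (x, -1, -1) (pvFlat ((x :: xs) :: rs))).2.2 = -1 := by rw [h2]
    rw [e1, e2]
    simp
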